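-- pv_equiv track=rewrite | github.com/RiddhiRex/Practice_code | maxDifference.py | maxDifferenceOddEven
-- ===== SOURCE A (Python) =====
-- def maxDifferenceOddEven(a):
--     if len(a) < 1:
--         return -1
--     minodd=float("inf")
--     maxdif = -float("inf")
--     for i in range(len(a)):
--         if(a[i]%2!=0):
--             minodd = min(minodd, a[i])
--         else:
--             if minodd!=-float("inf"):
--                 maxdif= max(maxdif, a[i]-minodd)
--     if maxdif==-float("inf"):
--         return -1
--     else:
--         return maxdif
-- ===== SOURCE B (Python) =====
-- def maxDifferenceOddEven(a):
--     if not a: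
--         return -1
--     # pass 1: prefix[i] = min odd value among a[0..i-1], None if no odd yet
--     prefix = []
--     m = None
--     for x in a:
--         prefix.append(m)
--         if x % 2 != 0:
--             m = x if m is None else min(m, x)
--     # pass 2: best even-minus-earlier-odd difference
--     best = None
--     for x, p in zip(a, prefix):
--         if x % 2 == 0 and p is not None:
--             d = x - p
--             if best is None or d > best:
--                 best = d
--     return -1 if best is None else best
-- ===== Notes on version B (the rewrite author's own statement) =====
-- stated objective: alternative
-- what changed: Replaces A's single interleaved scan carrying float +/-inf sentinels with two passes: first build a prefix table of the minimum odd value strictly before each index, then scan the table for the best even-minus-earlier-odd difference.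
import Mathlib
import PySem

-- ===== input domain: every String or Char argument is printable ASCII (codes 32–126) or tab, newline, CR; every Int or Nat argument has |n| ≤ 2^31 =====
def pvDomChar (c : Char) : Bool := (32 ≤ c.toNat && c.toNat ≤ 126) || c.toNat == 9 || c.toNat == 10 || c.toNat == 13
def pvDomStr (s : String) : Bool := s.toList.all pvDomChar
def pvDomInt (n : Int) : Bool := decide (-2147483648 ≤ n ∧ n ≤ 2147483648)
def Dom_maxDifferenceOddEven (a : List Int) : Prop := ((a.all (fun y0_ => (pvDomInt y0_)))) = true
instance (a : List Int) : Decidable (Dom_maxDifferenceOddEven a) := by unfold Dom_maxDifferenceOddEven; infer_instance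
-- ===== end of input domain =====

-- B replaces A's single interleaved scan by a prefix-min-of-odds table pass plus a separate max-difference scan (objective: alternative decomposition, same cost).

-- ===== PORT A =====
-- A's floats: minodd = none models +inf, maxdif = none models -inf (both only ever hold +/-inf or ints).
-- Loop body of A, on state (minodd, maxdif):
def pvStepA (s : Option Int × Option Int) (x : Int) : Option Int × Option Int :=
  if PySem.Int.mod x 2 ≠ 0 then
    (some (match s.1 with | none => x | some m => min m x), s.2)   -- minodd = min(minodd, a[i])
  else
    -- Python's guard `minodd != -float("inf")` is always true (minodd is +inf or an integer)
    (s.1, match s.1 with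
          | none => s.2   -- a[i] - inf = -inf, and max(maxdif, -inf) = maxdif
          | some m => some (match s.2 with | none => x - m | some d => max d (x - m)))

def maxDifferenceOddEven (a : List Int) : Int :=
  if a.length < 1 then -1
  else
    let st := (PySem.List.pyRange 0 a.length 1).foldl
      (fun s i => pvStepA s (PySem.List.pyGetD a i 0)) (none, none)
    match st.2 with
    | none => -1          -- maxdif == -float("inf")
    | some d => d

-- ===== PORT B =====
-- Source B pass 1 body: push the running min-odd (None = no odd yet), then update it
def pvStepPre (s : List (Option Int) × Option Int) (x : Int) : List (Option Int) × Option Int :=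
  (s.1 ++ [s.2],
   if PySem.Int.mod x 2 ≠ 0 then
     some (match s.2 with | none => x | some m => min m x)
   else s.2)

-- Source B pass 2 body: best accumulator (None = no pair yet)
def pvStepScan (b : Option Int) (xp : Int × Option Int) : Option Int :=
  if PySem.Int.mod xp.1 2 = 0 then
    match xp.2 with
    | none => b
    | some p =>
      let d := xp.1 - p
      match b with
      | none => some d
      | some bv => if bv < d then some d else some bv
  else b

def maxDifferenceOddEven_alt (a : List Int) : Int :=
  if a = [] then -1
  else
    let pr := a.foldl pvStepPre ([], none)
    let best := (a.zip pr.1).foldl pvStepScan none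
    match best with
    | none => -1
    | some bv => bv

-- ===== PRECONDITION & SPEC =====
def Spec_maxDifferenceOddEven (a : List Int) (out : Int) : Prop := out = maxDifferenceOddEven_alt a
instance (a : List Int) (out : Int) : Decidable (Spec_maxDifferenceOddEven a out) := by unfold Spec_maxDifferenceOddEven; infer_instance

-- ===== CLAIM (what is proved, stated in full; the proofs are below) =====
def Claim_equal_maxDifferenceOddEven : Prop := ∀ (a : List Int), Dom_maxDifferenceOddEven a → Spec_maxDifferenceOddEven a (maxDifferenceOddEven a)

-- ===== LEMMAS AND PROOFS =====

-- recursive characterisation of B's prefix table started from running min m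
def pvPrefRec (m : Option Int) : List Int → List (Option Int)
  | [] => []
  | x :: t => m :: pvPrefRec (if PySem.Int.mod x 2 ≠ 0 then
                                some (match m with | none => x | some mv => min mv x)
                              else m) t

theorem pvStepPre_fst (l : List Int) : ∀ (p : List (Option Int)) (m : Option Int),
    (l.foldl pvStepPre (p, m)).1 = p ++ pvPrefRec m l := by
  induction l with
  | nil => intro p m; simp [pvPrefRec]
  | cons x t ih =>
    intro p m
    simp only [List.foldl_cons, pvStepPre, pvPrefRec, ih]
    simp

theorem pvMain (l : List Int) : ∀ (mo md : Option Int),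
    (l.foldl pvStepA (mo, md)).2 = (l.zip (pvPrefRec mo l)).foldl pvStepScan md := by
  induction l with
  | nil => intro mo md; simp [pvPrefRec]
  | cons x t ih =>
    intro mo md
    have hm : PySem.Int.mod x 2 = x % 2 := PySem.Int.mod_eq_emod_of_pos (by norm_num)
    have key : pvStepA (mo, md) x =
        ((if PySem.Int.mod x 2 ≠ 0 then
            some (match mo with | none => x | some mv => min mv x) else mo),
         pvStepScan md (x, mo)) := by
      rcases Int.emod_two_eq x with h | h <;>
        cases mo <;> cases md <;>
          simp only [pvStepA, pvStepScan, hm, h] <;>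
            simp [max_def] <;> split_ifs <;> first | rfl | omega | (exact congrArg some (by omega))
    simp only [List.foldl_cons, pvPrefRec, List.zip_cons_cons, key, ih]

theorem pvFoldA (a : List Int) :
    (PySem.List.pyRange 0 a.length 1).foldl
      (fun s i => pvStepA s (PySem.List.pyGetD a i 0)) ((none : Option Int), (none : Option Int))
    = a.foldl pvStepA (none, none) := by
  have h := PySem.List.foldl_pyRange_pyGetD (xs := a) (f := pvStepA)
    (init := ((none : Option Int), (none : Option Int))) (d := 0) (a := 0) (by norm_num)
  simpa using h

-- ===== VERDICT (by name: the statement is the Claim_ definition above) =====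
theorem maxDifferenceOddEven_spec : Claim_equal_maxDifferenceOddEven := by
  intro a _
  unfold Spec_maxDifferenceOddEven maxDifferenceOddEven maxDifferenceOddEven_alt
  by_cases he : a = []
  · simp [he]
  · have hl : ¬ a.length < 1 := by
      simp [List.length_eq_zero_iff, he]
    simp only [he, hl, if_false]
    rw [pvFoldA, pvMain, pvStepPre_fst, List.nil_append]
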